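-- pv_equiv track=rewrite | github.com/koii-network/prometheus-beta | src/string_capitalizer.py | capitalize_strings
-- ===== SOURCE A (Python) =====
-- def capitalize_strings(input_array):
--     """
--     Capitalize each string in the given array.
--
--     Args:
--         input_array (list): A list of strings to be capitalized.
--
--     Returns:
--         list: A new list with each string capitalized.
--
--     Raises:
--         TypeError: If the input is not a list or contains non-string elements.
--     """
--     # Validate input is a list
--     if not isinstance(input_array, list):
--         raise TypeError("Input must be a list")
--
--     # Validate all elements are strings
--     if not all(isinstance(item, str) for item in input_array):
--         raise TypeError("All elements must be strings")
--
--     # Custom implementation to preserve leading whitespace if needed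
--     def custom_capitalize(s):
--         stripped = s.lstrip()
--         return s[0:len(s)-len(stripped)] + stripped.capitalize()
--
--     return [custom_capitalize(item) for item in input_array]
-- ===== SOURCE B (Python) =====
-- def capitalize_strings(input_array):
--     """Single-pass per string: walk the characters with a 'seen first
--     non-whitespace' flag instead of lstrip + slice + capitalize."""
--     if not isinstance(input_array, list):
--         raise TypeError("Input must be a list")
--     result = []
--     for item in input_array:
--         if not isinstance(item, str):
--             raise TypeError("All elements must be strings")
--         chars = []
--         seen = False
--         for c in item:
--             if seen:
--                 chars.append(c.lower())
--             elif c.isspace():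
--                 chars.append(c)
--             else:
--                 chars.append(c.upper())
--                 seen = True
--         result.append(''.join(chars))
--     return result
-- ===== Notes on version B (the rewrite author's own statement) =====
-- stated objective: alternative
-- what changed: Replaces lstrip + length-based slice + str.capitalize per string with a single character walk carrying a seen-first-non-whitespace flag, and merges the all()-validation pass into that loop.
import Mathlib
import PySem

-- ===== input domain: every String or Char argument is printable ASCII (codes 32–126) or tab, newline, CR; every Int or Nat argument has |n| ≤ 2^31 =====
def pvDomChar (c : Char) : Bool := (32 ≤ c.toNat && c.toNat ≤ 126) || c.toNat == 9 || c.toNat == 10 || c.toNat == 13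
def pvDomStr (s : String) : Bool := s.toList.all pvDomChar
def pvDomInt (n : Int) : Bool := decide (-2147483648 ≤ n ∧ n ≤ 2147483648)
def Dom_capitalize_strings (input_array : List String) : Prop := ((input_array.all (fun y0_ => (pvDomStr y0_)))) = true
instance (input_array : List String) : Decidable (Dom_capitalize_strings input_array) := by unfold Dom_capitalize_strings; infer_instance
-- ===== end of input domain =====

-- B walks each string once with a seen-first-non-whitespace flag instead of A's lstrip + slice + capitalize; same output.
-- ===== PORT A =====
-- by-hand port of Python's str.capitalize (exact on the ASCII domain: first char uppercased, the rest lowercased)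
def pyCapitalize (cs : List Char) : List Char :=
  match cs with
  | [] => []
  | c :: rest => PySem.Chars.upperChar c :: PySem.Chars.lower rest

-- custom_capitalize: stripped = s.lstrip(); s[0:len(s)-len(stripped)] + stripped.capitalize()
def customCapitalize (s : String) : String :=
  let cs := s.toList
  let stripped := PySem.Chars.lstrip cs
  String.mk (PySem.List.slice cs (some 0) (some ((cs.length : Int) - (stripped.length : Int))) ++ pyCapitalize stripped)

def capitalize_strings (input_array : List String) : List String :=
  input_array.map customCapitalize

-- ===== PORT B =====
-- the per-character loop of Source B: seen=False; copy whitespace, uppercase first non-space, lowercase the rest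
def altWalk : Bool → List Char → List Char
  | _, [] => []
  | true, c :: rest => PySem.Chars.lowerChar c :: altWalk true rest
  | false, c :: rest =>
      if PySem.Chars.isspace c then c :: altWalk false rest
      else PySem.Chars.upperChar c :: altWalk true rest

def capitalize_strings_alt (input_array : List String) : List String :=
  input_array.map (fun item => String.mk (altWalk false item.toList))

-- ===== PRECONDITION & SPEC =====
def Spec_capitalize_strings (input_array : List String) (out : List String) : Prop := out = capitalize_strings_alt input_array
instance (input_array : List String) (out : List String) : Decidable (Spec_capitalize_strings input_array out) := by unfold Spec_capitalize_strings; infer_instance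

-- ===== CLAIM (what is proved, stated in full; the proofs are below) =====
def Claim_equal_capitalize_strings : Prop := ∀ (input_array : List String), Dom_capitalize_strings input_array → Spec_capitalize_strings input_array (capitalize_strings input_array)

-- ===== LEMMAS AND PROOFS =====
theorem altWalk_true (cs : List Char) : altWalk true cs = PySem.Chars.lower cs := by
  induction cs with
  | nil => rfl
  | cons c rest ih => simp [altWalk, PySem.Chars.lower, ih]

theorem take_sub_dropWhile (p : Char → Bool) (cs : List Char) :
    cs.take (cs.length - (cs.dropWhile p).length) = cs.takeWhile p := by
  have hlen : (cs.takeWhile p).length + (cs.dropWhile p).length = cs.length := by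
    conv_rhs => rw [← List.takeWhile_append_dropWhile (p := p) (l := cs)]
    rw [List.length_append]
  have h : cs.length - (cs.dropWhile p).length = (cs.takeWhile p).length := by omega
  rw [h]
  exact ((List.prefix_iff_eq_take).1 (List.takeWhile_prefix p)).symm

theorem walk_eq (cs : List Char) :
    cs.takeWhile PySem.Chars.isspace ++ pyCapitalize (cs.dropWhile PySem.Chars.isspace)
      = altWalk false cs := by
  induction cs with
  | nil => rfl
  | cons c rest ih =>
    by_cases h : PySem.Chars.isspace c
    · simp [List.takeWhile_cons, List.dropWhile_cons, h, altWalk, ih]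
    · simp [List.takeWhile_cons, List.dropWhile_cons, h, altWalk, pyCapitalize, altWalk_true]

theorem item_eq (s : String) : customCapitalize s = String.mk (altWalk false s.toList) := by
  unfold customCapitalize
  simp only []
  set cs := s.toList with hcs
  have hb : (0 : Int) ≤ (cs.length : Int) - ((PySem.Chars.lstrip cs).length : Int) := by
    have : (PySem.Chars.lstrip cs).length ≤ cs.length := by
      simpa [PySem.Chars.lstrip] using List.length_dropWhile_le (p := PySem.Chars.isspace) (l := cs)
    omega
  show String.mk (PySem.List.slice cs (some 0) (some ((cs.length : Int) - ((PySem.Chars.lstrip cs).length : Int))) ++ pyCapitalize (PySem.Chars.lstrip cs)) = _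
  rw [PySem.List.slice_zero_start, PySem.List.slice_to _ hb]
  have ht : ((cs.length : Int) - ((PySem.Chars.lstrip cs).length : Int)).toNat
      = cs.length - (PySem.Chars.lstrip cs).length := by omega
  rw [ht]
  simp only [PySem.Chars.lstrip]
  rw [take_sub_dropWhile, walk_eq]

-- ===== VERDICT (by name: the statement is the Claim_ definition above) =====
theorem capitalize_strings_spec : Claim_equal_capitalize_strings := by
  intro input_array _
  unfold Spec_capitalize_strings capitalize_strings capitalize_strings_alt
  exact List.map_congr_left fun s _ => item_eq s
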